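-- pv_equiv track=rewrite | github.com/sv6-UCC/Web_Development_Project | practice (1).py | del_1000
-- ===== SOURCE A (Python) =====
-- def del_1000(courierData):
--     my_list = []
--     for x in zip(*courierData):
--         my_list.append(sum(x))
--         count = 0
--         for val in my_list:
--             if val > 1000:
--                 count = count + 1
--     return count
-- ===== SOURCE B (Python) =====
-- def del_1000(courierData):
--     columns = list(zip(*courierData))
--     if not columns:
--         raise ValueError("del_1000 needs at least one column")
--     return sum(1 for col in columns if sum(col) > 1000)
-- ===== Notes on version B (the rewrite author's own statement) =====
-- stated objective: simpler
-- what changed: B counts the column sums exceeding 1000 in a single pass over the transposed data instead of appending each sum to a list and re-scanning the whole list after every column; on no-column input, where A dies with UnboundLocalError, B raises an explicit ValueError.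
import Mathlib
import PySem

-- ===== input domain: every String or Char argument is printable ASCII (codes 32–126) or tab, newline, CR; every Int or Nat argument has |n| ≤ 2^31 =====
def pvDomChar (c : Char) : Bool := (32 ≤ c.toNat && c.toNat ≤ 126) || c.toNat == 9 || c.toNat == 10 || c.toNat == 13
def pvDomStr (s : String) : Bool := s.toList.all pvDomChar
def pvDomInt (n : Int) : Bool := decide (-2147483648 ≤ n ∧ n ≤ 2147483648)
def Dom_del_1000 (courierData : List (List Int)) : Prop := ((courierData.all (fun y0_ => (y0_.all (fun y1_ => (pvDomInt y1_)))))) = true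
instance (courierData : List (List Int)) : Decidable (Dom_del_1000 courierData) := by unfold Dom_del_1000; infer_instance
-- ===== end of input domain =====

-- B counts the column sums exceeding 1000 in one plain pass, instead of A's append
-- to a list and re-scan of the whole list after every column (objective: simpler);
-- on no-column input (where A dies with UnboundLocalError) B raises ValueError —
-- both error, so those inputs are outside Pre_.
-- Python's zip(*rows): columns up to the shortest row (shared primitive of both ports).
def pyZipStar (rows : List (List Int)) : List (List Int) :=
  match rows with
  | [] => []
  | r :: rs =>
    (List.range (rs.foldl (fun m x => min m x.length) r.length)).map
      (fun i => rows.map (fun row => row.getD i 0))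

-- ===== PORT A =====
-- state = (my_list, count); count is recomputed over the whole my_list each iteration,
-- exactly as in A.  Initial count 0 stands for Python's unbound 'count' (Pre_ excludes
-- the no-column inputs, on which A raises UnboundLocalError).
def del_1000 (courierData : List (List Int)) : Int :=
  ((pyZipStar courierData).foldl
    (fun (st : List Int × Int) x =>
      let myList := st.1 ++ [x.sum]
      (myList, myList.foldl (fun c v => if v > 1000 then c + 1 else c) 0))
    ([], 0)).2

-- ===== PORT B =====
-- Source B raises ValueError when columns = []; Pre_ excludes those inputs, the port returns 0 there.
def del_1000_alt (courierData : List (List Int)) : Int :=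
  let columns := pyZipStar courierData
  if columns = [] then 0
  else columns.foldl (fun c col => if col.sum > 1000 then c + 1 else c) 0

-- ===== PRECONDITION & SPEC =====
-- Pre_ excludes exactly the no-column inputs (empty list, or some empty row), on which
-- A raises UnboundLocalError and B raises ValueError.
def Pre_del_1000 (courierData : List (List Int)) : Prop :=
  courierData ≠ [] ∧ ∀ r ∈ courierData, r ≠ []
instance (courierData : List (List Int)) : Decidable (Pre_del_1000 courierData) := by
  unfold Pre_del_1000; infer_instance
def pvWitness_del_1000 : List (List Int) := [[2000, 3], [5, 7]]

def Spec_del_1000 (courierData : List (List Int)) (out : Int) : Prop := out = del_1000_alt courierData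
instance (courierData : List (List Int)) (out : Int) : Decidable (Spec_del_1000 courierData out) := by unfold Spec_del_1000; infer_instance

-- ===== CLAIM (what is proved, stated in full; the proofs are below) =====
def Claim_equal_del_1000 : Prop := ∀ (courierData : List (List Int)), Dom_del_1000 courierData → Pre_del_1000 courierData → Spec_del_1000 courierData (del_1000 courierData)

-- ===== LEMMAS AND PROOFS =====
-- A's loop: after folding the remaining columns from state (l, c), my_list is l ++ sums
-- and the count is the recomputed count over it — except with no columns it is just c.
theorem aFold_eq (cs : List (List Int)) (l : List Int) (c : Int) :
    (cs.foldl
      (fun (st : List Int × Int) x =>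
        let myList := st.1 ++ [x.sum]
        (myList, myList.foldl (fun c v => if v > 1000 then c + 1 else c) 0))
      (l, c)) =
    (l ++ cs.map List.sum,
     if cs = [] then c
     else (l ++ cs.map List.sum).foldl (fun c v => if v > 1000 then c + 1 else c) 0) := by
  induction cs generalizing l c with
  | nil => simp
  | cons x xs ih =>
    simp only [List.foldl_cons, List.map_cons]
    rw [ih]
    by_cases h : xs = [] <;> simp [h, List.append_assoc]

-- B's fold over columns is the count over the list of column sums.
theorem bFold_eq (cs : List (List Int)) (c : Int) :
    cs.foldl (fun c col => if col.sum > 1000 then c + 1 else c) c =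
    (cs.map List.sum).foldl (fun c v => if v > 1000 then c + 1 else c) c := by
  induction cs generalizing c with
  | nil => rfl
  | cons x xs ih => simp [ih]

-- zeta-reduction of the 'let columns' in B's port
theorem alt_eq (courierData : List (List Int)) :
    del_1000_alt courierData =
    if pyZipStar courierData = [] then 0
    else (pyZipStar courierData).foldl (fun c col => if col.sum > 1000 then c + 1 else c) 0 := rfl

theorem del_1000_eq (courierData : List (List Int)) :
    del_1000 courierData = del_1000_alt courierData := by
  rw [alt_eq]
  unfold del_1000
  rw [aFold_eq, bFold_eq]
  by_cases h : pyZipStar courierData = [] <;> simp [h]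

-- ===== VERDICT (by name: the statement is the Claim_ definition above) =====
theorem del_1000_spec : Claim_equal_del_1000 := by
  intro d _ _
  exact del_1000_eq d
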